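-- pv_equiv track=rewrite | github.com/piotrcurious/righteous_dub_generator | harmonia_v5/theory/server.py | identify_triad
-- ===== SOURCE A (Python) =====
-- from typing import List, Dict, Tuple, Optional, Set, FrozenSet, Any
--
-- def identify_triad(pcs: List[int], edo: int = 12) -> Optional[Tuple[int, str]]:
--     s = set(p % edo for p in pcs)
--     def d(s12): return round(s12 * edo / 12.0)
--     for root in range(edo):
--         for q, ivs in [('maj',[4,7]),('min',[3,7]),('dim',[3,6]),('aug',[4,8])]:
--             if s == {root%edo, (root+d(ivs[0]))%edo, (root+d(ivs[1]))%edo}: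
--                 return (root, q)
--     return None
-- ===== SOURCE B (Python) =====
-- from typing import List, Tuple, Optional
--
-- def identify_triad(pcs: List[int], edo: int = 12) -> Optional[Tuple[int, str]]:
--     # Normalize by the root: a chord rooted at r matches quality q iff the set of
--     # intervals above r equals q's interval signature. Precompute the four
--     # signatures once as a hash table keyed by the sorted interval tuple, then do
--     # one O(1) lookup per candidate root (only roots present in s can match).
--     s = set(p % edo for p in pcs)
--     if len(s) > 3:
--         return None  # a triad signature has at most 3 distinct pitch classes
--     table = {}
--     for q, (a, b) in (('maj', (4, 7)), ('min', (3, 7)), ('dim', (3, 6)), ('aug', (4, 8))):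
--         key = tuple(sorted({0, _step(a, edo) % edo, _step(b, edo) % edo}))
--         table.setdefault(key, q)  # first quality wins on signature collisions
--     for root in sorted(s):
--         q = table.get(tuple(sorted((x - root) % edo for x in s)))
--         if q is not None:
--             return (root, q)
--     return None
--
-- def _step(s12: int, edo: int) -> int:
--     # round(s12 * edo / 12.0) computed exactly in integers (half-to-even).
--     q, r = divmod(s12 * edo, 12)
--     if r < 6:
--         return q
--     if r > 6:
--         return q + 1
--     return q if q % 2 == 0 else q + 1
-- ===== Notes on version B (the rewrite author's own statement) =====
-- stated objective: faster
-- what changed: B inverts the search: instead of constructing four candidate chord sets for every root in range(edo), it returns None outright when more than 3 distinct pitch classes are present, precomputes the four quality interval signatures once in a dict keyed by sorted interval tuple, and for each present pitch class resolves the quality of the root-relative interval signature by a single dict lookup; interval rounding is done exactly in integers (half-to-even divmod) instead of float round. …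
-- outside the precondition, e.g. on identify_triad([38], -1): A returns None, B returns (0, 'maj'); on identify_triad([], 0): A returns None, B raises ZeroDivisionError
import Mathlib
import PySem

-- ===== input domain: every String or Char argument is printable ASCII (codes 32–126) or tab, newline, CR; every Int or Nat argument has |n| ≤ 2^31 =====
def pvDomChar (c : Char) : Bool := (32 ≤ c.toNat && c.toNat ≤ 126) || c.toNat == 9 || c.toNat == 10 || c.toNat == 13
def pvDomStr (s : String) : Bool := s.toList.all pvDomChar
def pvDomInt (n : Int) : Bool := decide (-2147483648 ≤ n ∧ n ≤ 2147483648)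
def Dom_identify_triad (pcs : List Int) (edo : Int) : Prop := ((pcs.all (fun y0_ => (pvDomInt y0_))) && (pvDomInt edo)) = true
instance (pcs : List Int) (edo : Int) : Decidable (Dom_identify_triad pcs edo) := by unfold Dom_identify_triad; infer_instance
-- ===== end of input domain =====

-- B resolves each present pitch class's root-relative interval signature by one lookup in a
-- precomputed signature table instead of scanning every root in range(edo); return value only.

-- ===== PORT A =====
-- d(s12) = round(s12 * edo / 12.0): exact integer model of Python's float round (half-to-even).
-- Exact for |edo| ≤ 2^31: |s12*edo| ≤ 2^34 < 2^53, so s12*edo/12.0 is the float nearest s12*edo/12,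
-- half-integers are hit exactly and non-half multiples of 1/12 are ≥ 1/12 - ulp/2 from any .5 boundary.
def pyRound12 (s12 edo : Int) : Int :=
  let q := PySem.Int.floordiv (s12 * edo) 12
  let r := PySem.Int.mod (s12 * edo) 12
  if r < 6 then q else if r > 6 then q + 1 else if PySem.Int.mod q 2 = 0 then q else q + 1

def identify_triad (pcs : List Int) (edo : Int) : Option (Int × String) :=
  let s : PySem.Set Int := PySem.Set.ofList (pcs.map (fun p => PySem.Int.mod p edo))
  (PySem.List.pyRange 0 edo 1).findSome? (fun root =>
    ([("maj", [4, 7]), ("min", [3, 7]), ("dim", [3, 6]), ("aug", [4, 8])] : List (String × List Int)).findSome?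
      (fun qi =>
        if PySem.Set.equal s (PySem.Set.ofList
            [PySem.Int.mod root edo,
             PySem.Int.mod (root + pyRound12 (PySem.List.pyGetD qi.2 0 0) edo) edo,
             PySem.Int.mod (root + pyRound12 (PySem.List.pyGetD qi.2 1 0) edo) edo])
        then some (root, qi.1) else none))

-- ===== PORT B =====
-- _step(s12, edo): Source B's integer half-to-even rounding, transliterated.
def bStep (s12 edo : Int) : Int :=
  let q := PySem.Int.floordiv (s12 * edo) 12
  let r := PySem.Int.mod (s12 * edo) 12
  if r < 6 then q else if r > 6 then q + 1 else if PySem.Int.mod q 2 = 0 then q else q + 1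

-- key = tuple(sorted({0, _step(a, edo) % edo, _step(b, edo) % edo}))
def bSig (a b edo : Int) : List Int :=
  PySem.List.sorted
    (PySem.Set.ofList [0, PySem.Int.mod (bStep a edo) edo, PySem.Int.mod (bStep b edo) edo])
    (fun x => x) false

def identify_triad_alt (pcs : List Int) (edo : Int) : Option (Int × String) :=
  let s : PySem.Set Int := PySem.Set.ofList (pcs.map (fun p => PySem.Int.mod p edo))
  if 3 < PySem.Set.len s then none  -- a triad signature has at most 3 distinct pitch classes
  else
  let table : PySem.Dict (List Int) String :=
    ([("maj", (4, 7)), ("min", (3, 7)), ("dim", (3, 6)), ("aug", (4, 8))] : List (String × (Int × Int))).foldl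
      (fun d qi => d.setdefault (bSig qi.2.1 qi.2.2 edo) qi.1) PySem.Dict.empty
  (PySem.List.sorted s (fun x => x) false).findSome? (fun root =>
    (table.get? (PySem.List.sorted (s.map (fun x => PySem.Int.mod (x - root) edo)) (fun x => x) false)).map
      (fun q => (root, q)))

-- ===== PRECONDITION & SPEC =====
-- Pre_ restricts to the natural domain edo ≥ 1: edo = 0 makes A raise ZeroDivisionError on any
-- nonempty pcs (and B raises even on empty pcs), and a negative edo is outside the natural domain
-- of an EDO (A's empty range(edo) then always yields None).
def Pre_identify_triad (_pcs : List Int) (edo : Int) : Prop := 1 ≤ edo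
instance (pcs : List Int) (edo : Int) : Decidable (Pre_identify_triad pcs edo) := by unfold Pre_identify_triad; infer_instance

def pvWitness_identify_triad : List Int × Int := ([0, 4, 7], 12)

def Spec_identify_triad (pcs : List Int) (edo : Int) (out : Option (Int × String)) : Prop := out = identify_triad_alt pcs edo
instance (pcs : List Int) (edo : Int) (out : Option (Int × String)) : Decidable (Spec_identify_triad pcs edo out) := by unfold Spec_identify_triad; infer_instance

-- ===== CLAIM (what is proved, stated in full; the proofs are below) =====
def Claim_equal_identify_triad : Prop := ∀ (pcs : List Int) (edo : Int), Dom_identify_triad pcs edo → Pre_identify_triad pcs edo → Spec_identify_triad pcs edo (identify_triad pcs edo)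

-- ===== LEMMAS AND PROOFS =====

theorem findSome?_congr_mem {α β : Type} {l : List α} {f g : α → Option β}
    (h : ∀ x ∈ l, f x = g x) : l.findSome? f = l.findSome? g := by
  induction l with
  | nil => rfl
  | cons a t ih =>
    simp only [List.findSome?_cons, h a (by simp)]
    cases g a with
    | none => exact ih (fun x hx => h x (by simp [hx]))
    | some b => rfl

theorem findSome?_filter_of_none {α β : Type} {l : List α} {p : α → Bool} {f : α → Option β}
    (h : ∀ x ∈ l, p x = false → f x = none) :
    l.findSome? f = (l.filter p).findSome? f := by
  induction l with
  | nil => rfl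
  | cons a t ih =>
    by_cases hp : p a = true
    · simp [hp, List.findSome?_cons]
      cases f a with
      | none => exact ih (fun x hx hpx => h x (by simp [hx]) hpx)
      | some b => rfl
    · have hpa : p a = false := by simpa using hp
      simp [hpa, h a (by simp) hpa]
      exact ih (fun x hx hpx => h x (by simp [hx]) hpx)

-- lookup through one setdefault: earlier binding wins, the new pair is the fallback
theorem get?_setdefault_fallback (d : PySem.Dict (List Int) String) (k k' : List Int) (v : String) :
    (d.setdefault k v).get? k' =
      match d.get? k' with
      | some w => some w
      | none => if k' = k then some v else none := by
  by_cases hc : d.contains k = true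
  · rw [PySem.Dict.setdefault_of_contains d v hc]
    cases h : d.get? k' with
    | some w => rfl
    | none =>
      by_cases hk : k' = k
      · subst hk
        rw [PySem.Dict.contains_eq_isSome_get?] at hc
        rw [h] at hc; simp at hc
      · simp [hk]
  · have hc' : d.contains k = false := by simpa using hc
    rw [PySem.Dict.setdefault_of_not_contains d v hc', PySem.Dict.get?_insert]
    cases h : d.get? k' with
    | some w =>
      by_cases hk : k' = k
      · subst hk
        rw [PySem.Dict.contains_eq_isSome_get?, h] at hc'; simp at hc'
      · simp [hk]
    | none =>
      by_cases hk : k' = k <;> simp [hk]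

-- the signature table resolves a key by first match over the four qualities
theorem get?_table (edo : Int) (k : List Int) :
    (([("maj", ((4 : Int), (7 : Int))), ("min", (3, 7)), ("dim", (3, 6)), ("aug", (4, 8))] : List (String × (Int × Int))).foldl
      (fun d qi => d.setdefault (bSig qi.2.1 qi.2.2 edo) qi.1) PySem.Dict.empty).get? k =
      if k = bSig 4 7 edo then some "maj"
      else if k = bSig 3 7 edo then some "min"
      else if k = bSig 3 6 edo then some "dim"
      else if k = bSig 4 8 edo then some "aug"
      else none := by
  simp only [List.foldl_cons, List.foldl_nil]
  rw [get?_setdefault_fallback, get?_setdefault_fallback, get?_setdefault_fallback,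
      get?_setdefault_fallback, PySem.Dict.get?_empty]
  split_ifs <;> rfl

-- root-normalization: the chord set matches quality (a,b) at root r iff the sorted
-- root-relative interval list equals that quality's signature key
theorem bridge (edo : Int) (hedo : 0 < edo) (s : List Int)
    (hmem : ∀ x ∈ s, 0 ≤ x ∧ x < edo) (hnd : s.Nodup) (r : Int) (hr : r ∈ s) (a b : Int) :
    (PySem.Set.equal s (PySem.Set.ofList
        [r, PySem.Int.mod (r + bStep a edo) edo, PySem.Int.mod (r + bStep b edo) edo]) = true)
    ↔ PySem.List.sorted (s.map (fun x => PySem.Int.mod (x - r) edo)) (fun x => x) false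
        = bSig a b edo := by
  have hr0 := (hmem r hr).1
  have hr1 := (hmem r hr).2
  -- abbreviations: f x = (x - r) % edo, g z = (r + z) % edo
  set f : Int → Int := fun x => PySem.Int.mod (x - r) edo with hf
  set g : Int → Int := fun z => PySem.Int.mod (r + z) edo with hg
  have hme : ∀ x : Int, PySem.Int.mod x edo = x % edo := fun x => PySem.Int.mod_eq_emod_of_pos hedo
  have hgf : ∀ x : Int, 0 ≤ x → x < edo → g (f x) = x := by
    intro x h0 h1
    rw [hg, hf]; simp only [hme]
    rw [Int.add_emod, Int.emod_emod_of_dvd _ (dvd_refl edo), ← Int.add_emod]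
    simpa using Int.emod_eq_of_lt h0 h1
  have hfg : ∀ z : Int, 0 ≤ z → z < edo → f (g z) = z := by
    intro z h0 h1
    rw [hg, hf]; simp only [hme]
    rw [Int.sub_emod, Int.emod_emod_of_dvd _ (dvd_refl edo), ← Int.sub_emod]
    have : r + z - r = z := by ring
    rw [this]
    exact Int.emod_eq_of_lt h0 h1
  have hgm : ∀ z : Int, g (PySem.Int.mod z edo) = g z := by
    intro z
    rw [hg]; simp only [hme]
    rw [Int.add_emod, Int.emod_emod_of_dvd _ (dvd_refl edo), ← Int.add_emod]
  have hfr : f r = 0 := by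
    rw [hf]; simp [hme]
  -- the signature components and their bounds
  set a' : Int := PySem.Int.mod (bStep a edo) edo with ha'
  set b' : Int := PySem.Int.mod (bStep b edo) edo with hb'
  have ha0 : 0 ≤ a' := PySem.Int.mod_nonneg _ hedo
  have ha1 : a' < edo := PySem.Int.mod_lt _ hedo
  have hb0 : 0 ≤ b' := PySem.Int.mod_nonneg _ hedo
  have hb1 : b' < edo := PySem.Int.mod_lt _ hedo
  have ht1 : PySem.Int.mod (r + bStep a edo) edo = g a' := by rw [ha', hgm]
  have ht2 : PySem.Int.mod (r + bStep b edo) edo = g b' := by rw [hb', hgm]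
  have hndm : (s.map f).Nodup := by
    apply List.Nodup.map_on _ hnd
    intro x hx y hy hxy
    have : g (f x) = g (f y) := by rw [hxy]
    rwa [hgf x (hmem x hx).1 (hmem x hx).2, hgf y (hmem y hy).1 (hmem y hy).2] at this
  unfold bSig
  rw [ht1, ht2, ← ha', ← hb']
  rw [PySem.List.sorted_id_eq_sorted_id_iff_perm]
  rw [PySem.Set.equal_iff]
  rw [List.perm_ext_iff_of_nodup hndm (PySem.Set.nodup_ofList _)]
  simp only [PySem.Set.mem_ofList, List.mem_map, List.mem_cons, List.not_mem_nil, or_false]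
  constructor
  · intro h z
    constructor
    · rintro ⟨x, hx, rfl⟩
      rcases (h x).1 hx with hxr | hx1 | hx2
      · subst hxr; exact Or.inl hfr
      · rw [hx1, hfg a' ha0 ha1]; exact Or.inr (Or.inl rfl)
      · rw [hx2, hfg b' hb0 hb1]; exact Or.inr (Or.inr rfl)
    · rintro (rfl | rfl | rfl)
      · exact ⟨r, hr, hfr⟩
      · exact ⟨g a', (h (g a')).2 (Or.inr (Or.inl rfl)), hfg a' ha0 ha1⟩
      · exact ⟨g b', (h (g b')).2 (Or.inr (Or.inr rfl)), hfg b' hb0 hb1⟩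
  · intro h y
    constructor
    · intro hy
      rcases (h (f y)).1 ⟨y, hy, rfl⟩ with h0 | h1 | h2
      · left
        have := hgf y (hmem y hy).1 (hmem y hy).2
        rw [h0] at this
        rw [← this, hg]
        simp only [add_zero, hme]
        exact Int.emod_eq_of_lt hr0 hr1
      · right; left
        have := hgf y (hmem y hy).1 (hmem y hy).2
        rw [h1] at this
        exact this.symm
      · right; right
        have := hgf y (hmem y hy).1 (hmem y hy).2
        rw [h2] at this
        exact this.symm
    · rintro (rfl | rfl | rfl)
      · exact hr
      · rcases (h a').2 (Or.inr (Or.inl rfl)) with ⟨x, hx, hfx⟩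
        have := hgf x (hmem x hx).1 (hmem x hx).2
        rw [hfx] at this
        rwa [this]
      · rcases (h b').2 (Or.inr (Or.inr rfl)) with ⟨x, hx, hfx⟩
        have := hgf x (hmem x hx).1 (hmem x hx).2
        rw [hfx] at this
        rwa [this]

-- ===== VERDICT =====
theorem identify_triad_spec : Claim_equal_identify_triad := by
  intro pcs edo _ hpre
  unfold Spec_identify_triad identify_triad identify_triad_alt
  have hedo : (0 : Int) < edo := hpre
  set s : PySem.Set Int := PySem.Set.ofList (pcs.map (fun p => PySem.Int.mod p edo)) with hs
  have hmem : ∀ x ∈ s, 0 ≤ x ∧ x < edo := by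
    intro x hx
    rw [hs, PySem.Set.mem_ofList] at hx
    rcases List.mem_map.1 hx with ⟨p, _, rfl⟩
    exact ⟨PySem.Int.mod_nonneg p hedo, PySem.Int.mod_lt p hedo⟩
  have hnd : s.Nodup := by rw [hs]; exact PySem.Set.nodup_ofList _
  set fA : Int → Option (Int × String) := fun root =>
    ([("maj", [4, 7]), ("min", [3, 7]), ("dim", [3, 6]), ("aug", [4, 8])] : List (String × List Int)).findSome?
      (fun qi =>
        if PySem.Set.equal s (PySem.Set.ofList
            [PySem.Int.mod root edo,
             PySem.Int.mod (root + pyRound12 (PySem.List.pyGetD qi.2 0 0) edo) edo,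
             PySem.Int.mod (root + pyRound12 (PySem.List.pyGetD qi.2 1 0) edo) edo])
        then some (root, qi.1) else none) with hfA
  set fB : Int → Option (Int × String) := fun root =>
    ((([("maj", ((4 : Int), (7 : Int))), ("min", (3, 7)), ("dim", (3, 6)), ("aug", (4, 8))] : List (String × (Int × Int))).foldl
        (fun d qi => d.setdefault (bSig qi.2.1 qi.2.2 edo) qi.1) PySem.Dict.empty).get?
      (PySem.List.sorted (s.map (fun x => PySem.Int.mod (x - root) edo)) (fun x => x) false)).map
      (fun q => (root, q)) with hfB
  by_cases hlen : 3 < PySem.Set.len s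
  · -- more than three distinct pitch classes: no chord set of A can match either
    rw [if_pos hlen]
    have hfalse3 : ∀ x y z : Int, PySem.Set.equal s (PySem.Set.ofList [x, y, z]) = false := by
      intro x y z
      by_contra hne
      have heq : PySem.Set.equal s (PySem.Set.ofList [x, y, z]) = true := by
        cases h : PySem.Set.equal s (PySem.Set.ofList [x, y, z]) with
        | false => exact absurd h hne
        | true => rfl
      have hperm := (List.perm_ext_iff_of_nodup hnd (PySem.Set.nodup_ofList _)).2
        (fun w => (PySem.Set.equal_iff _ _).1 heq w)
      have hle := PySem.Set.length_ofList_le (α := Int) [x, y, z]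
      have hl := hperm.length_eq
      simp only [PySem.Set.len] at hlen
      simp at hle
      omega
    apply List.findSome?_eq_none_iff.2
    intro r _
    simp [hfalse3]
  rw [if_neg hlen]
  have hmodself : ∀ r : Int, 0 ≤ r → r < edo → PySem.Int.mod r edo = r := by
    intro r h0 h1
    rw [PySem.Int.mod_eq_emod_of_pos hedo]
    exact Int.emod_eq_of_lt h0 h1
  -- for a root present in s the quality scan and the signature lookup agree
  have hAB : ∀ r ∈ s, fA r = fB r := by
    intro r hr
    have h0 := (hmem r hr).1
    have h1 := (hmem r hr).2
    rw [hfA, hfB]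
    beta_reduce
    rw [get?_table]
    simp only [List.findSome?_cons, List.findSome?_nil, hmodself r h0 h1]
    have e47 := bridge edo hedo s hmem hnd r hr 4 7
    have e37 := bridge edo hedo s hmem hnd r hr 3 7
    have e36 := bridge edo hedo s hmem hnd r hr 3 6
    have e48 := bridge edo hedo s hmem hnd r hr 4 8
    have p1 : pyRound12 (PySem.List.pyGetD ([4, 7] : List Int) 0 0) edo = bStep 4 edo := rfl
    have p2 : pyRound12 (PySem.List.pyGetD ([4, 7] : List Int) 1 0) edo = bStep 7 edo := rfl
    have p3 : pyRound12 (PySem.List.pyGetD ([3, 7] : List Int) 0 0) edo = bStep 3 edo := rfl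
    have p4 : pyRound12 (PySem.List.pyGetD ([3, 7] : List Int) 1 0) edo = bStep 7 edo := rfl
    have p5 : pyRound12 (PySem.List.pyGetD ([3, 6] : List Int) 0 0) edo = bStep 3 edo := rfl
    have p6 : pyRound12 (PySem.List.pyGetD ([3, 6] : List Int) 1 0) edo = bStep 6 edo := rfl
    have p7 : pyRound12 (PySem.List.pyGetD ([4, 8] : List Int) 0 0) edo = bStep 4 edo := rfl
    have p8 : pyRound12 (PySem.List.pyGetD ([4, 8] : List Int) 1 0) edo = bStep 8 edo := rfl
    rw [p1, p2, p3, p4, p5, p6, p7, p8]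
    by_cases c1 : PySem.List.sorted (s.map (fun x => PySem.Int.mod (x - r) edo)) (fun x => x) false = bSig 4 7 edo
    · rw [if_pos (e47.2 c1), if_pos c1]; rfl
    · rw [if_neg (fun h => c1 (e47.1 h)), if_neg c1]
      by_cases c2 : PySem.List.sorted (s.map (fun x => PySem.Int.mod (x - r) edo)) (fun x => x) false = bSig 3 7 edo
      · rw [if_pos (e37.2 c2), if_pos c2]; rfl
      · rw [if_neg (fun h => c2 (e37.1 h)), if_neg c2]
        by_cases c3 : PySem.List.sorted (s.map (fun x => PySem.Int.mod (x - r) edo)) (fun x => x) false = bSig 3 6 edo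
        · rw [if_pos (e36.2 c3), if_pos c3]; rfl
        · rw [if_neg (fun h => c3 (e36.1 h)), if_neg c3]
          by_cases c4 : PySem.List.sorted (s.map (fun x => PySem.Int.mod (x - r) edo)) (fun x => x) false = bSig 4 8 edo
          · rw [if_pos (e48.2 c4), if_pos c4]; rfl
          · rw [if_neg (fun h => c4 (e48.1 h)), if_neg c4]; rfl
  -- a root whose residue is not in s never matches in A
  have hnone : ∀ r : Int, 0 ≤ r → r < edo → r ∉ s → fA r = none := by
    intro r h0 h1 hr
    rw [hfA]
    simp only [List.findSome?_cons, List.findSome?_nil]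
    have : ∀ t : List Int, PySem.Set.equal s (PySem.Set.ofList (PySem.Int.mod r edo :: t)) = false := by
      intro t
      by_contra hne
      have heq : PySem.Set.equal s (PySem.Set.ofList (PySem.Int.mod r edo :: t)) = true := by
        cases h : PySem.Set.equal s (PySem.Set.ofList (PySem.Int.mod r edo :: t)) with
        | false => exact absurd h hne
        | true => rfl
      have := (PySem.Set.equal_iff _ _).1 heq (PySem.Int.mod r edo)
      have hin : PySem.Int.mod r edo ∈ s := by
        apply this.2
        rw [PySem.Set.mem_ofList]
        simp
      rw [hmodself r h0 h1] at hin
      exact hr hin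
    simp [this]
  -- A's scan over range(edo) equals the scan over range(edo) filtered to s
  have step1 : (PySem.List.pyRange 0 edo 1).findSome? fA
      = ((PySem.List.pyRange 0 edo 1).filter (fun r => decide (r ∈ s))).findSome? fA := by
    apply findSome?_filter_of_none
    intro x hx hpx
    have hx' := (PySem.List.mem_pyRange_one).1 hx
    exact hnone x hx'.1 hx'.2 (by simpa using hpx)
  -- the filtered range IS sorted(s)
  have step2 : (PySem.List.pyRange 0 edo 1).filter (fun r => decide (r ∈ s))
      = PySem.List.sorted s (fun x => x) false := by
    symm
    apply PySem.List.sorted_eq_of_perm_of_pairwise_lt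
    · apply (List.perm_ext_iff_of_nodup _ _).2
      · intro x
        simp only [List.mem_filter, PySem.List.mem_pyRange_one, decide_eq_true_eq]
        constructor
        · rintro ⟨⟨_, _⟩, hxs⟩; exact hxs
        · intro hxs; exact ⟨⟨(hmem x hxs).1, (hmem x hxs).2⟩, hxs⟩
      · exact (PySem.List.nodup_pyRange_one 0 edo).filter _
      · exact hnd
    · exact (PySem.List.pairwise_lt_pyRange_one 0 edo).filter _
  -- on sorted(s) the per-root values agree
  have step3 : (PySem.List.sorted s (fun x => x) false).findSome? fA
      = (PySem.List.sorted s (fun x => x) false).findSome? fB := by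
    apply findSome?_congr_mem
    intro x hx
    exact hAB x ((PySem.List.mem_sorted _ _ _ _).1 hx)
  calc (PySem.List.pyRange 0 edo 1).findSome? fA
      = ((PySem.List.pyRange 0 edo 1).filter (fun r => decide (r ∈ s))).findSome? fA := step1
    _ = (PySem.List.sorted s (fun x => x) false).findSome? fA := by rw [step2]
    _ = (PySem.List.sorted s (fun x => x) false).findSome? fB := step3
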